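-- pv_equiv track=rewrite | github.com/KevinMLanderos/JHU-Sequences | src/parallelization_with_mPBWT.py | reorder_duplicates
-- ===== SOURCE A (Python) =====
-- def reorder_duplicates(duplicates, current_ak, previous_ak):
--     """
--     Generate new_dk by reordering Xs and counting matches from right to left
--
--     Args:
--         Xs (list): List of binary lists representing the patterns
--         corrected_ak (list): Corrected ordering to apply to Xs
--
--     Returns:
--         list: new_dk values
--     """
--     result = current_ak.copy()
--
--     for duplicate_values in duplicates.values():
--         # Get current positions of duplicate values in current_ak
--         current_positions = [result.index(val) for val in duplicate_values]
--
--         # Get positions in previous_ak and create ordering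
--         prev_positions = [previous_ak.index(val) for val in duplicate_values]
--         # Create pairs of (value, position in previous_ak)
--         value_prev_pos = list(zip(duplicate_values, prev_positions))
--         # Sort by position in previous_ak
--         value_prev_pos.sort(key=lambda x: x[1])
--         # Extract just the values in correct order
--         ordered_values = [x[0] for x in value_prev_pos]
--
--         # Sort current positions
--         current_positions.sort()
--
--         # Create mapping of where each value should go
--         for i, pos in enumerate(current_positions):
--             result[pos] = ordered_values[i]
--
--     return result
-- ===== SOURCE B (Python) =====
-- def reorder_duplicates(duplicates, current_ak, previous_ak):
--     result = list(current_ak)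
--     for values in duplicates.values():
--         members = set(values)
--         queue = iter(sorted(values, key=previous_ak.index))
--         result = [next(queue, x) if x in members else x for x in result]
--     return result
-- ===== Notes on version B (the rewrite author's own statement) =====
-- stated objective: simpler
-- what changed: Instead of A's per-group gather-positions / sort-positions / scatter-assign via repeated list.index calls, B makes one forward pass over the current list per group, replacing each group member it meets by the next element of that group's queue pre-sorted by previous_ak.index (next(queue, x) keeps x when the queue is exhausted). …
-- outside the precondition, e.g. on reorder_duplicates({1: [2, 2, 3]}, [3, 2], [2, 3]): A returns [2, 3], B returns [2, 2]; on reorder_duplicates({1: [4, 0]}, [3, 4, 4, 0, 4], [0, 3, 4]): A returns [3, 0, 4, 4, 4], B returns [3, 0, 4, 0, 4]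
import Mathlib
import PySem

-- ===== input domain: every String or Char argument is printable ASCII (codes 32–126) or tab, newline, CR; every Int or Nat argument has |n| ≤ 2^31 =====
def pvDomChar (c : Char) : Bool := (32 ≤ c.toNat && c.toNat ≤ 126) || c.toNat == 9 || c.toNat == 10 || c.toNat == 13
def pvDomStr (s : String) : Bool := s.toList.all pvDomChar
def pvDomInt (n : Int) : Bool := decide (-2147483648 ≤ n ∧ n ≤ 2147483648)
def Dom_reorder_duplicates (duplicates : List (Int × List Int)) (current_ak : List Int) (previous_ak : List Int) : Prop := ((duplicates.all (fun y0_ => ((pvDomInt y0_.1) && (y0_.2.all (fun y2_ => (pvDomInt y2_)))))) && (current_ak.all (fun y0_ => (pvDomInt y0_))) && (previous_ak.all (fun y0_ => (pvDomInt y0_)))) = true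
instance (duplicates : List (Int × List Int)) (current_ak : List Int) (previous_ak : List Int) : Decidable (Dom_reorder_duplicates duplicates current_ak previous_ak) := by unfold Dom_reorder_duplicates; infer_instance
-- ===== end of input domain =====

-- B replaces A's per-group gather/sort/scatter of positions (repeated list.index) by a single
-- forward replacement pass per group pulling from a queue pre-sorted by previous_ak order (objective: simpler).

-- ===== PORT A =====
-- 'duplicates' is a Python dict with unique keys; its .values() is the assoc list's second components.
def reorder_duplicates (duplicates : List (Int × List Int)) (current_ak : List Int) (previous_ak : List Int) : List Int :=
  (duplicates.map Prod.snd).foldl (fun result duplicate_values =>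
    -- result.index(val): ValueError (none) excluded by Pre_; .getD 0 unreachable there
    let current_positions : List Int :=
      duplicate_values.map (fun v => (((PySem.List.index? result v).getD 0 : Nat) : Int))
    let prev_positions : List Int :=
      duplicate_values.map (fun v => (((PySem.List.index? previous_ak v).getD 0 : Nat) : Int))
    let value_prev_pos := duplicate_values.zip prev_positions
    let sorted_pairs := PySem.List.sorted value_prev_pos (fun p => p.2) false
    let ordered_values := sorted_pairs.map Prod.fst
    let sorted_positions := PySem.List.sorted current_positions (fun x => x) false
    (PySem.List.enumerate sorted_positions).foldl
      (fun r ip => PySem.List.pySetD r ip.2 ((PySem.List.pyGet? ordered_values ip.1).getD 0)) result)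
    current_ak

-- ===== PORT B =====
-- inner loop of B: rebuild result, replacing members by 'next(queue, x)'; the [] branch is the
-- iterator's exhausted-default case (keep x), exactly Python's next(queue, x).
def pvRebuild (members : PySem.Set Int) (queue : List Int) : List Int → List Int
  | [] => []
  | x :: xs =>
    if PySem.Set.contains members x then
      match queue with
      | [] => x :: pvRebuild members [] xs
      | q :: qs => q :: pvRebuild members qs xs
    else x :: pvRebuild members queue xs

def reorder_duplicates_alt (duplicates : List (Int × List Int)) (current_ak : List Int) (previous_ak : List Int) : List Int :=
  (duplicates.map Prod.snd).foldl (fun result values =>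
    let members := PySem.Set.ofList values
    -- previous_ak.index(v): ValueError excluded by Pre_
    let queue := PySem.List.sorted values
      (fun v => (((PySem.List.index? previous_ak v).getD 0 : Nat) : Int)) false
    pvRebuild members queue result)
    current_ak

-- ===== PRECONDITION & SPEC =====
-- Pre_ excludes: (a) inputs where some group value is missing from current_ak or previous_ak — A raises
-- ValueError there; (b) inputs where a group value occurs more than once in current_ak or where a group
-- repeats a value — there A's first-match .index and last-write-wins assignment produce accidental
-- results that B's forward pass does not reproduce.
def Pre_reorder_duplicates (duplicates : List (Int × List Int)) (current_ak : List Int) (previous_ak : List Int) : Prop :=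
  ∀ p ∈ duplicates, p.2.Nodup ∧ ∀ v ∈ p.2, current_ak.count v = 1 ∧ v ∈ previous_ak
instance (duplicates : List (Int × List Int)) (current_ak : List Int) (previous_ak : List Int) : Decidable (Pre_reorder_duplicates duplicates current_ak previous_ak) := by unfold Pre_reorder_duplicates; infer_instance

def pvWitness_reorder_duplicates : (List (Int × List Int)) × List Int × List Int :=
  ([(1, [5, 3]), (2, [7])], [3, 7, 5, 4], [5, 4, 3, 7])

def Spec_reorder_duplicates (duplicates : List (Int × List Int)) (current_ak : List Int) (previous_ak : List Int) (out : List Int) : Prop := out = reorder_duplicates_alt duplicates current_ak previous_ak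
instance (duplicates : List (Int × List Int)) (current_ak : List Int) (previous_ak : List Int) (out : List Int) : Decidable (Spec_reorder_duplicates duplicates current_ak previous_ak out) := by unfold Spec_reorder_duplicates; infer_instance

-- ===== CLAIM (what is proved, stated in full; the proofs are below) =====
def Claim_equal_reorder_duplicates : Prop := ∀ (duplicates : List (Int × List Int)) (current_ak : List Int) (previous_ak : List Int), Dom_reorder_duplicates duplicates current_ak previous_ak → Pre_reorder_duplicates duplicates current_ak previous_ak → Spec_reorder_duplicates duplicates current_ak previous_ak (reorder_duplicates duplicates current_ak previous_ak)

-- ===== LEMMAS AND PROOFS =====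

-- helper definitions for the proofs (position of v in r; the two fold bodies)
def pvPos (r : List Int) (v : Int) : Int := (((PySem.List.index? r v).getD 0 : Nat) : Int)

def pvAf (previous_ak : List Int) (result : List Int) (duplicate_values : List Int) : List Int :=
  let current_positions : List Int :=
    duplicate_values.map (fun v => (((PySem.List.index? result v).getD 0 : Nat) : Int))
  let prev_positions : List Int :=
    duplicate_values.map (fun v => (((PySem.List.index? previous_ak v).getD 0 : Nat) : Int))
  let value_prev_pos := duplicate_values.zip prev_positions
  let sorted_pairs := PySem.List.sorted value_prev_pos (fun p => p.2) false
  let ordered_values := sorted_pairs.map Prod.fst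
  let sorted_positions := PySem.List.sorted current_positions (fun x => x) false
  (PySem.List.enumerate sorted_positions).foldl
    (fun r ip => PySem.List.pySetD r ip.2 ((PySem.List.pyGet? ordered_values ip.1).getD 0)) result

def pvBf (previous_ak : List Int) (result : List Int) (values : List Int) : List Int :=
  pvRebuild (PySem.Set.ofList values)
    (PySem.List.sorted values (fun v => (((PySem.List.index? previous_ak v).getD 0 : Nat) : Int)) false)
    result

theorem pvA_eq_foldl (d : List (Int × List Int)) (c p : List Int) :
    reorder_duplicates d c p = (d.map Prod.snd).foldl (pvAf p) c := rfl

theorem pvB_eq_foldl (d : List (Int × List Int)) (c p : List Int) :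
    reorder_duplicates_alt d c p = (d.map Prod.snd).foldl (pvBf p) c := rfl

theorem pv_contains_ofList (g : List Int) (y : Int) :
    PySem.Set.contains (PySem.Set.ofList g) y = decide (y ∈ g) := by
  simp [PySem.Set.contains, PySem.Set.mem_ofList]

-- g.zip (g.map k) is the graph of k on g
theorem pv_zip_map (g : List Int) (k : Int → Int) :
    g.zip (g.map k) = g.map (fun v => (v, k v)) := by
  induction g with
  | nil => rfl
  | cons x xs ih => simp [ih]

theorem pv_insertBy_emb (k : Int → Int) (x : Int) (ys : List Int) :
    PySem.List.insertBy (fun a b => decide (a.2 < b.2)) ((x, k x) : Int × Int)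
        (ys.map (fun v => (v, k v)))
      = (PySem.List.insertBy (fun a b => decide (k a < k b)) x ys).map (fun v => (v, k v)) := by
  induction ys with
  | nil => rfl
  | cons y ys ih =>
    simp only [List.map_cons, PySem.List.insertBy]
    by_cases h : k x < k y
    · simp [h]
    · simp [h, ih]

theorem pv_foldl_insertBy_emb (k : Int → Int) (g acc : List Int) :
    (g.map (fun v => (v, k v))).foldl
        (fun acc x => PySem.List.insertBy (fun a b => decide (a.2 < b.2)) x acc)
        (acc.map (fun v => (v, k v)))
      = (g.foldl (fun acc x => PySem.List.insertBy (fun a b => decide (k a < k b)) x acc) acc).map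
          (fun v => (v, k v)) := by
  induction g generalizing acc with
  | nil => rfl
  | cons x xs ih => simpa [pv_insertBy_emb k x acc] using ih (PySem.List.insertBy (fun a b => decide (k a < k b)) x acc)

-- A's sort of (value, key) pairs by second component, projected to values, is B's keyed sort
theorem pv_sorted_pairs_fst (k : Int → Int) (g : List Int) :
    (PySem.List.sorted (g.zip (g.map k)) (fun p => p.2) false).map Prod.fst
      = PySem.List.sorted g k false := by
  rw [pv_zip_map]
  rw [PySem.List.sorted_eq_foldl_insertBy, PySem.List.sorted_eq_foldl_insertBy]
  have h := pv_foldl_insertBy_emb k g []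
  simp only [List.map_nil] at h
  rw [h, List.map_map]
  exact List.map_id _

theorem pv_pos_nonneg (r : List Int) (v : Int) : 0 ≤ pvPos r v :=
  Int.natCast_nonneg _

theorem pv_pos_cons_self (x : Int) (xs : List Int) : pvPos (x :: xs) x = 0 := by
  simp [pvPos, List.idxOf?_cons]

theorem pv_pos_cons_ne (x v : Int) (xs : List Int) (hne : x ≠ v) (hv : v ∈ xs) :
    pvPos (x :: xs) v = pvPos xs v + 1 := by
  unfold pvPos
  rw [PySem.List.index?_cons_of_ne xs hne]
  obtain ⟨kk, hk⟩ := Option.isSome_iff_exists.1 ((PySem.List.index?_isSome_iff xs v).2 hv)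
  rw [hk]
  simp

-- values of a nodup group have pairwise-distinct positions in a list containing them
theorem pv_pos_map_nodup (r g : List Int) (hg : g.Nodup)
    (hsub : ∀ v ∈ g, v ∈ r) : (g.map (pvPos r)).Nodup := by
  refine hg.map_on ?_
  intro v hv w hw hvw
  obtain ⟨kv, hkv⟩ := Option.isSome_iff_exists.1 ((PySem.List.index?_isSome_iff r v).2 (hsub v hv))
  obtain ⟨kw, hkw⟩ := Option.isSome_iff_exists.1 ((PySem.List.index?_isSome_iff r w).2 (hsub w hw))
  obtain ⟨hv1, hv2, -⟩ := PySem.List.getElem_of_index?_eq_some hkv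
  obtain ⟨hw1, hw2, -⟩ := PySem.List.getElem_of_index?_eq_some hkw
  simp only [pvPos, hkv, hkw, Option.getD_some, Nat.cast_inj] at hvw
  subst hvw
  rw [← hv2, ← hw2]

theorem pv_sorted_strict (l : List Int) (h : l.Nodup) :
    (PySem.List.sorted l (fun x => x) false).Pairwise (· < ·) := by
  have h1 := PySem.List.sorted_pairwise l (fun x => x)
  have h2 : (PySem.List.sorted l (fun x => x) false).Nodup :=
    (PySem.List.sorted_perm l (fun x => x) false).nodup_iff.2 h
  exact (h1.and h2).imp (fun {a b} hab => lt_of_le_of_ne hab.1 hab.2)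

theorem pv_sorted_shift (l : List Int) (h : l.Nodup) :
    PySem.List.sorted (l.map (· + 1)) (fun x => x) false
      = (PySem.List.sorted l (fun x => x) false).map (· + 1) := by
  refine PySem.List.sorted_eq_of_perm_of_pairwise_lt _ _ (fun x => x)
    ((PySem.List.sorted_perm l (fun x => x) false).map _) ?_
  refine List.Pairwise.map _ ?_ (pv_sorted_strict l h)
  intro a b hab
  show a + 1 < b + 1
  omega

theorem pv_sorted_cons_zero_shift (l : List Int) (h : l.Nodup) (hn : ∀ p ∈ l, 0 ≤ p) :
    PySem.List.sorted ((0:Int) :: l.map (· + 1)) (fun x => x) false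
      = 0 :: (PySem.List.sorted l (fun x => x) false).map (· + 1) := by
  refine PySem.List.sorted_eq_of_perm_of_pairwise_lt _ _ (fun x => x)
    (List.Perm.cons 0 ((PySem.List.sorted_perm l (fun x => x) false).map _)) ?_
  refine List.pairwise_cons.2 ⟨?_, ?_⟩
  · intro p hp
    obtain ⟨p0, hp0, rfl⟩ := List.mem_map.1 hp
    have := hn p0 ((PySem.List.mem_sorted l (fun x => x) false p0).1 hp0)
    show (0:Int) < p0 + 1
    omega
  · refine List.Pairwise.map _ ?_ (pv_sorted_strict l h)
    intro a b hab
    show a + 1 < b + 1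
    omega

-- A's enumerate/indexing scatter loop is a fold over the zip of positions with the queue
theorem pv_enum_scatter (ps : List Int) (q : List Int) (s : Nat) (r : List Int)
    (hlen : s + ps.length ≤ q.length) :
    (PySem.List.enumerate ps (s : Int)).foldl
        (fun r ip => PySem.List.pySetD r ip.2 ((PySem.List.pyGet? q ip.1).getD 0)) r
      = ((ps.zip (q.drop s)).foldl (fun r pv => PySem.List.pySetD r pv.1 pv.2) r) := by
  induction ps generalizing s r with
  | nil => simp [PySem.List.enumerate_nil]
  | cons p ps ih =>
    rw [PySem.List.enumerate_cons]
    have hs : s < q.length := by simp at hlen; omega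
    have hget : PySem.List.pyGet? q (s : Int) = some q[s] := by
      rw [PySem.List.pyGet?_natCast]; simp [hs]
    have hdrop : q.drop s = q[s] :: q.drop (s + 1) := (List.drop_eq_getElem_cons hs)
    rw [hdrop]
    simp only [List.zip_cons_cons, List.foldl_cons, hget, Option.getD_some]
    have : ((s : Int) + 1) = ((s + 1 : Nat) : Int) := by push_cast; ring
    rw [this, ih (s + 1) _ (by simp at hlen ⊢; omega)]

-- scattering at shifted positions leaves the head alone
theorem pv_scatter_shift (ps q : List Int) (y : Int) (xs : List Int)
    (hn : ∀ p ∈ ps, 0 ≤ p) :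
    (((ps.map (· + 1)).zip q).foldl (fun r pv => PySem.List.pySetD r pv.1 pv.2) (y :: xs))
      = y :: ((ps.zip q).foldl (fun r pv => PySem.List.pySetD r pv.1 pv.2) xs) := by
  induction ps generalizing q y xs with
  | nil => simp
  | cons p ps ih =>
    cases q with
    | nil => simp
    | cons q0 q' =>
      simp only [List.map_cons, List.zip_cons_cons, List.foldl_cons]
      have hp := hn p (List.mem_cons_self ..)
      have hset : PySem.List.pySetD (y :: xs) (p + 1) q0 = y :: PySem.List.pySetD xs p q0 := by
        rw [PySem.List.pySetD_of_nonneg (y :: xs) q0 (by omega), PySem.List.pySetD_of_nonneg xs q0 hp]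
        have : (p + 1).toNat = p.toNat + 1 := by omega
        rw [this]
        rfl
      rw [hset, ih _ _ _ (fun p hp => hn p (List.mem_cons_of_mem _ hp))]

theorem pv_rebuild_congr (xs : List Int) : ∀ (q : List Int) (m1 m2 : PySem.Set Int),
    (∀ y ∈ xs, PySem.Set.contains m1 y = PySem.Set.contains m2 y) →
    pvRebuild m1 q xs = pvRebuild m2 q xs := by
  induction xs with
  | nil => intro q m1 m2 h; rfl
  | cons x xs ih =>
    intro q m1 m2 h
    have hx := h x (List.mem_cons_self ..)
    have ht : ∀ y ∈ xs, PySem.Set.contains m1 y = PySem.Set.contains m2 y :=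
      fun y hy => h y (List.mem_cons_of_mem _ hy)
    cases q with
    | nil =>
      simp only [pvRebuild, hx]
      by_cases hc : PySem.Set.contains m2 x <;> simp only [hc, Bool.false_eq_true, if_true, if_false] <;> rw [ih _ _ _ ht]
    | cons q0 q' =>
      simp only [pvRebuild, hx]
      by_cases hc : PySem.Set.contains m2 x <;> simp only [hc, Bool.false_eq_true, if_true, if_false] <;> rw [ih _ _ _ ht]

-- core: A's sorted-position scatter IS B's single replacement pass
theorem pv_scatter_eq_rebuild (r : List Int) : ∀ (g q : List Int), g.Nodup →
    (∀ v ∈ g, r.count v = 1) → q.length = g.length →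
    ((PySem.List.sorted (g.map (pvPos r)) (fun x => x) false).zip q).foldl
        (fun r pv => PySem.List.pySetD r pv.1 pv.2) r
      = pvRebuild (PySem.Set.ofList g) q r := by
  induction r with
  | nil =>
    intro g q hg hcnt hq
    have hgnil : g = [] := List.eq_nil_iff_forall_not_mem.2 (fun v hv => by have := hcnt v hv; simp at this)
    subst hgnil
    have : q = [] := List.eq_nil_of_length_eq_zero (by simpa using hq)
    subst this
    rfl
  | cons x xs ih =>
    intro g q hg hcnt hq
    by_cases hx : x ∈ g
    · -- head is a group member
      cases q with
      | nil =>
        exfalso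
        have : g.length ≠ 0 := by
          intro h0; rw [List.length_eq_zero_iff] at h0; subst h0; simp at hx
        simp at hq; omega
      | cons q0 q' =>
        have hxxs : x ∉ xs := by
          have := hcnt x hx
          rw [List.count_cons] at this
          exact List.count_eq_zero.1 (by simp at this; omega)
        have hcnt' : ∀ v ∈ g.erase x, xs.count v = 1 := by
          intro v hv
          have hv' := (List.Nodup.mem_erase_iff hg).1 hv
          have hxv : x ≠ v := Ne.symm hv'.1
          have := hcnt v hv'.2
          simpa [List.count_cons, hxv] using this
        have herasesub : ∀ v ∈ g.erase x, v ∈ xs := fun v hv =>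
          List.count_pos_iff.1 (by rw [hcnt' v hv]; omega)
        have hmapE : (g.erase x).map (pvPos (x :: xs))
            = ((g.erase x).map (pvPos xs)).map (· + 1) := by
          rw [List.map_map]
          refine List.map_congr_left ?_
          intro v hv
          have hv' := (List.Nodup.mem_erase_iff hg).1 hv
          exact pv_pos_cons_ne x v xs (Ne.symm hv'.1) (herasesub v hv)
        have hperm : (g.map (pvPos (x :: xs))).Perm
            ((0:Int) :: ((g.erase x).map (pvPos xs)).map (· + 1)) := by
          have h1 : g.Perm (x :: g.erase x) := List.perm_cons_erase hx
          have h2 := h1.map (pvPos (x :: xs))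
          rw [List.map_cons, pv_pos_cons_self, hmapE] at h2
          exact h2
        have hl'nodup : ((g.erase x).map (pvPos xs)).Nodup :=
          pv_pos_map_nodup xs (g.erase x) (hg.erase x) herasesub
        have hsortedEq : PySem.List.sorted (g.map (pvPos (x :: xs))) (fun x => x) false
            = (0:Int) :: (PySem.List.sorted ((g.erase x).map (pvPos xs)) (fun x => x) false).map (· + 1) := by
          rw [PySem.List.sorted_eq_sorted_of_perm _ _ (fun x => x) (fun a b h => h) hperm]
          exact pv_sorted_cons_zero_shift _ hl'nodup
            (fun p hp => by obtain ⟨v, hv, rfl⟩ := List.mem_map.1 hp; exact pv_pos_nonneg xs v)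
        rw [hsortedEq]
        simp only [List.zip_cons_cons, List.foldl_cons]
        have hset0 : PySem.List.pySetD (x :: xs) 0 q0 = q0 :: xs := by
          rw [PySem.List.pySetD_of_nonneg (x :: xs) q0 (by omega)]
          rfl
        rw [hset0]
        rw [pv_scatter_shift _ q' q0 xs (fun p hp => by
          have hp' := (PySem.List.mem_sorted _ (fun x => x) false p).1 hp
          obtain ⟨v, hv, rfl⟩ := List.mem_map.1 hp'
          exact pv_pos_nonneg xs v)]
        have hq' : q'.length = (g.erase x).length := by
          have := List.length_erase_of_mem hx
          simp at hq
          omega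
        rw [ih (g.erase x) q' (hg.erase x) hcnt' hq']
        have hcont : PySem.Set.contains (PySem.Set.ofList g) x = true := by
          rw [pv_contains_ofList]; simp [hx]
        simp only [pvRebuild, hcont, if_true]
        refine congrArg _ ?_
        refine pv_rebuild_congr xs q' _ _ ?_
        intro y hy
        rw [pv_contains_ofList, pv_contains_ofList]
        have hyx : y ≠ x := fun h => hxxs (h ▸ hy)
        simp [List.Nodup.mem_erase_iff hg, hyx]
    · -- head is not a group member
      have hcnt' : ∀ v ∈ g, xs.count v = 1 := by
        intro v hv
        have hvx : x ≠ v := fun h => hx (h.symm ▸ hv)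
        have := hcnt v hv
        simpa [List.count_cons, hvx] using this
      have hsub' : ∀ v ∈ g, v ∈ xs := fun v hv =>
        List.count_pos_iff.1 (by rw [hcnt' v hv]; omega)
      have hmapE : g.map (pvPos (x :: xs)) = (g.map (pvPos xs)).map (· + 1) := by
        rw [List.map_map]
        refine List.map_congr_left ?_
        intro v hv
        have hvx : x ≠ v := fun h => hx (h ▸ hv)
        exact pv_pos_cons_ne x v xs hvx (hsub' v hv)
      rw [hmapE, pv_sorted_shift _ (pv_pos_map_nodup xs g hg hsub')]
      rw [pv_scatter_shift _ q x xs (fun p hp => by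
        have hp' := (PySem.List.mem_sorted _ (fun x => x) false p).1 hp
        obtain ⟨v, hv, rfl⟩ := List.mem_map.1 hp'
        exact pv_pos_nonneg xs v)]
      rw [ih g q hg hcnt' hq]
      have hcont : PySem.Set.contains (PySem.Set.ofList g) x = false := by
        rw [pv_contains_ofList]; simp [hx]
      simp only [pvRebuild, hcont, Bool.false_eq_true, if_false]

-- the replacement pass permutes: it exchanges the group occurrences for the queue
theorem pv_rebuild_perm (r : List Int) : ∀ (g q : List Int), g.Nodup →
    (∀ v ∈ g, r.count v = 1) → q.length = g.length →
    (pvRebuild (PySem.Set.ofList g) q r).Perm (q ++ r.filter (fun y => !decide (y ∈ g))) := by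
  induction r with
  | nil =>
    intro g q hg hcnt hq
    have hgnil : g = [] := List.eq_nil_iff_forall_not_mem.2 (fun v hv => by have := hcnt v hv; simp at this)
    subst hgnil
    have : q = [] := List.eq_nil_of_length_eq_zero (by simpa using hq)
    subst this
    rfl
  | cons x xs ih =>
    intro g q hg hcnt hq
    by_cases hx : x ∈ g
    · cases q with
      | nil =>
        exfalso
        have : g.length ≠ 0 := by
          intro h0; rw [List.length_eq_zero_iff] at h0; subst h0; simp at hx
        simp at hq; omega
      | cons q0 q' =>
        have hcont : PySem.Set.contains (PySem.Set.ofList g) x = true := by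
          rw [pv_contains_ofList]; simp [hx]
        simp only [pvRebuild, hcont, if_true]
        have hxxs : x ∉ xs := by
          have := hcnt x hx
          rw [List.count_cons] at this
          exact List.count_eq_zero.1 (by simp at this; omega)
        have hcnt' : ∀ v ∈ g.erase x, xs.count v = 1 := by
          intro v hv
          have hv' := (List.Nodup.mem_erase_iff hg).1 hv
          have hxv : x ≠ v := Ne.symm hv'.1
          have := hcnt v hv'.2
          simpa [List.count_cons, hxv] using this
        have herasesub : ∀ v ∈ g.erase x, v ∈ xs := fun v hv =>
          List.count_pos_iff.1 (by rw [hcnt' v hv]; omega)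
        have hswap : pvRebuild (PySem.Set.ofList g) q' xs
            = pvRebuild (PySem.Set.ofList (g.erase x)) q' xs := by
          refine pv_rebuild_congr xs q' _ _ ?_
          intro y hy
          rw [pv_contains_ofList, pv_contains_ofList]
          have hyx : y ≠ x := fun h => hxxs (h ▸ hy)
          simp [List.Nodup.mem_erase_iff hg, hyx]
        rw [hswap]
        have hq' : q'.length = (g.erase x).length := by
          have := List.length_erase_of_mem hx
          have hg1 : g.length ≠ 0 := by
            intro h0; rw [List.length_eq_zero_iff] at h0; subst h0; simp at hx
          simp at hq; omega
        have hIH := ih (g.erase x) q' (hg.erase x) hcnt' hq'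
        have hfiltereq : xs.filter (fun y => !decide (y ∈ g.erase x))
            = xs.filter (fun y => !decide (y ∈ g)) := by
          refine List.filter_congr ?_
          intro y hy
          have hyx : y ≠ x := fun h => hxxs (h ▸ hy)
          simp [List.Nodup.mem_erase_iff hg, hyx]
        rw [hfiltereq] at hIH
        have hhead : (x :: xs).filter (fun y => !decide (y ∈ g))
            = xs.filter (fun y => !decide (y ∈ g)) := by
          simp [hx]
        rw [List.cons_append, hhead]
        exact hIH.cons q0
    · have hcont : PySem.Set.contains (PySem.Set.ofList g) x = false := by
        rw [pv_contains_ofList]; simp [hx]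
      simp only [pvRebuild, hcont, Bool.false_eq_true, if_false]
      have hcnt' : ∀ v ∈ g, xs.count v = 1 := by
        intro v hv
        have hvx : x ≠ v := fun h => hx (h.symm ▸ hv)
        have := hcnt v hv
        simpa [List.count_cons, hvx] using this
      have hIH := ih g q hg hcnt' hq
      have hhead : (x :: xs).filter (fun y => !decide (y ∈ g))
          = x :: xs.filter (fun y => !decide (y ∈ g)) := by
        simp [hx]
      rw [hhead]
      exact (hIH.cons x).trans List.perm_middle.symm

-- one group step: A's body equals B's body on a nodup result containing the nodup group
theorem pv_step_eq (prev r g : List Int) (hg : g.Nodup)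
    (hcnt : ∀ v ∈ g, r.count v = 1) : pvAf prev r g = pvBf prev r g := by
  have hq : (PySem.List.sorted g (fun v => (((PySem.List.index? prev v).getD 0 : Nat) : Int)) false).length = g.length :=
    (PySem.List.sorted_perm g _ false).length_eq
  have hA : pvAf prev r g
      = (PySem.List.enumerate (PySem.List.sorted (g.map (pvPos r)) (fun x => x) false) ((0:Nat):Int)).foldl
          (fun r ip => PySem.List.pySetD r ip.2
            ((PySem.List.pyGet? ((PySem.List.sorted
              (g.zip (g.map (fun v => (((PySem.List.index? prev v).getD 0 : Nat) : Int))))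
              (fun p => p.2) false).map Prod.fst) ip.1).getD 0)) r := rfl
  rw [hA, pv_sorted_pairs_fst]
  rw [pv_enum_scatter _ _ 0 r (by
    rw [hq, (PySem.List.sorted_perm (g.map (pvPos r)) (fun x => x) false).length_eq, List.length_map]
    omega)]
  rw [List.drop_zero]
  exact pv_scatter_eq_rebuild r g _ hg hcnt hq

theorem pv_step_perm (prev r g : List Int) (hg : g.Nodup)
    (hcnt : ∀ v ∈ g, r.count v = 1) : (pvBf prev r g).Perm r := by
  have hq : (PySem.List.sorted g (fun v => (((PySem.List.index? prev v).getD 0 : Nat) : Int)) false).length = g.length :=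
    (PySem.List.sorted_perm g _ false).length_eq
  refine (pv_rebuild_perm r g _ hg hcnt hq).trans ?_
  have hqg : (PySem.List.sorted g (fun v => (((PySem.List.index? prev v).getD 0 : Nat) : Int)) false).Perm g :=
    PySem.List.sorted_perm g _ false
  refine (hqg.append_right _).trans ?_
  have hfnodup : (r.filter (fun y => decide (y ∈ g))).Nodup := by
    refine List.nodup_iff_count_le_one.2 ?_
    intro a
    by_cases ha : a ∈ g
    · exact le_trans (List.Sublist.count_le a List.filter_sublist) (le_of_eq (hcnt a ha))
    · have hnm : a ∉ r.filter (fun y => decide (y ∈ g)) := by simp [List.mem_filter, ha]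
      simp [List.count_eq_zero.2 hnm]
  have hgfilter : g.Perm (r.filter (fun y => decide (y ∈ g))) := by
    refine (List.perm_ext_iff_of_nodup hg hfnodup).mpr ?_
    intro a
    simp only [List.mem_filter, decide_eq_true_eq]
    exact ⟨fun h => ⟨List.count_pos_iff.1 (by rw [hcnt a h]; omega), h⟩, fun h => h.2⟩
  refine (hgfilter.append_right _).trans ?_
  exact List.filter_append_perm _ r

theorem pv_fold_eq (prev : List Int) (gs : List (List Int)) (r cur : List Int)
    (hperm : r.Perm cur)
    (hgs : ∀ g ∈ gs, g.Nodup ∧ ∀ v ∈ g, cur.count v = 1) :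
    gs.foldl (pvAf prev) r = gs.foldl (pvBf prev) r := by
  induction gs generalizing r with
  | nil => rfl
  | cons g gs ih =>
    have hgg := hgs g (List.mem_cons_self ..)
    have hcnt : ∀ v ∈ g, r.count v = 1 := fun v hv => (hperm.count_eq v).trans (hgg.2 v hv)
    have hstep := pv_step_eq prev r g hgg.1 hcnt
    have hp : (pvBf prev r g).Perm cur := (pv_step_perm prev r g hgg.1 hcnt).trans hperm
    simp only [List.foldl_cons, hstep]
    exact ih _ hp (fun g' hg' => hgs g' (List.mem_cons_of_mem _ hg'))

-- ===== VERDICT (by name: the statement is the Claim_ definition above) =====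
theorem reorder_duplicates_spec : Claim_equal_reorder_duplicates := by
  intro d c p _hdom hpre
  unfold Spec_reorder_duplicates
  rw [pvA_eq_foldl, pvB_eq_foldl]
  refine (pv_fold_eq p (d.map Prod.snd) c c (List.Perm.refl c) ?_)
  intro g hgmem
  obtain ⟨pr, hpr, rfl⟩ := List.mem_map.1 hgmem
  exact ⟨(hpre pr hpr).1, fun v hv => ((hpre pr hpr).2 v hv).1⟩
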